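-- pv_equiv track=rewrite | github.com/silverslither/stem | filters/lu.py | pretty_zpadded
-- ===== SOURCE A (Python) =====
-- def pretty_zpadded(arr):
--     n = len(arr)
--     start = 0
--     end = n
--     for i in range(n):
--         if arr[i] == 0:
--             start = i + 1
--         else:
--             break
--     for i in range(n - 1, -1, -1):
--         if arr[i] == 0:
--             end = i
--         else:
--             break
--     if end < start:
--         return f"({n})"
--     return f'{f"({start})" : <5}{str(arr[start:end])} ({n - end})'
-- ===== SOURCE B (Python) =====
-- def pretty_zpadded(arr):
--     n = len(arr)
--     first = None
--     last = None
--     for i, x in enumerate(arr):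
--         if x != 0:
--             if first is None:
--                 first = i
--             last = i
--     start = first if first is not None else n
--     end = last + 1 if last is not None else 0
--     if end < start:
--         return f"({n})"
--     return f'{f"({start})" : <5}{str(arr[start:end])} ({n - end})'
-- ===== Notes on version B (the rewrite author's own statement) =====
-- stated objective: alternative
-- what changed: B replaces A's two early-breaking boundary scans (forward for leading zeros, backward for trailing zeros) by a single forward enumerate pass tracking the first and last non-zero index, deriving start/end from them; the formatting step is unchanged.
import Mathlib
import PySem

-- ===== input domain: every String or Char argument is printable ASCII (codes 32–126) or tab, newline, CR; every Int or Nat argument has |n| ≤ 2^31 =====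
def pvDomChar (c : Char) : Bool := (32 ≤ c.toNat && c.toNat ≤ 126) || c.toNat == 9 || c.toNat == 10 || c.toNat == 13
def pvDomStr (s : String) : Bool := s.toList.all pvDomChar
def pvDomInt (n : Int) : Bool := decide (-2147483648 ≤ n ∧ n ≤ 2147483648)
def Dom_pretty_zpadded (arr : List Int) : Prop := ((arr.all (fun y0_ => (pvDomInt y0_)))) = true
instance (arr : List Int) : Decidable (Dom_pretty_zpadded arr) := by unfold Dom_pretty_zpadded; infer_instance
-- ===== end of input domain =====

-- B replaces A's two early-breaking boundary scans by one full forward pass tracking the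
-- first and last non-zero index (objective: alternative decomposition, same cost).

-- Shared final formatting (the literal last three lines of both Pythons, which are identical):
-- if end < start: return f"({n})"; return f'{f"({start})" : <5}{str(arr[start:end])} ({n - end})'
-- Built on List Char (kernel-transparent); str(list) = "[" + ", ".join(str(x)) + "]".
def pvFmt (arr : List Int) (s e : Int) : String :=
  let n : Int := (arr.length : Int)
  if e < s then String.mk ('(' :: PySem.Int.toChars n ++ [')'])
  else
    let hd : List Char := '(' :: PySem.Int.toChars s ++ [')']
    let pad : List Char := hd ++ List.replicate (5 - hd.length) ' '   -- f"…" : <5 (left-justify)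
    let body : List Char :=
      '[' :: PySem.Chars.join [',', ' '] ((PySem.List.slice arr (some s) (some e)).map PySem.Int.toChars) ++ [']']
    String.mk (pad ++ body ++ [' ', '('] ++ PySem.Int.toChars (n - e) ++ [')'])

-- ===== PORT A =====
-- first loop: for i in range(n): if arr[i] == 0: start = i + 1 else: break
def pvScanStartA : List Int → Nat → Nat → Nat
  | [], _, start => start
  | x :: xs, i, start => if x = 0 then pvScanStartA xs (i + 1) (i + 1) else (x :: xs).length * 0 + start

-- second loop: for i in range(n - 1, -1, -1): if arr[i] == 0: end = i else: break
-- (arr.getD i 0: the index i is always in range here, so this equals Python's arr[i])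
def pvScanEndA (arr : List Int) : Nat → Nat → Nat
  | 0, e => e
  | i + 1, e => if arr.getD i 0 = 0 then pvScanEndA arr i i else e

def pretty_zpadded (arr : List Int) : String :=
  pvFmt arr (pvScanStartA arr 0 0 : Int) (pvScanEndA arr arr.length arr.length : Int)

-- ===== PORT B =====
-- single forward pass over enumerate(arr): first set once, last updated each non-zero
def pvScanB : List (Int × Int) → Option Int → Option Int → Option Int × Option Int
  | [], f, la => (f, la)
  | (i, x) :: rest, f, la =>
      if x ≠ 0 then pvScanB rest (if f = none then some i else f) (some i)
      else pvScanB rest f la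

def pretty_zpadded_alt (arr : List Int) : String :=
  pvFmt arr
    ((pvScanB (PySem.List.enumerate arr 0) none none).1.getD (arr.length : Int))  -- first if found else n
    (match (pvScanB (PySem.List.enumerate arr 0) none none).2 with               -- last+1 if found else 0
      | some j => j + 1
      | none => 0)

-- ===== PRECONDITION & SPEC =====
def Spec_pretty_zpadded (arr : List Int) (out : String) : Prop := out = pretty_zpadded_alt arr
instance (arr : List Int) (out : String) : Decidable (Spec_pretty_zpadded arr out) := by unfold Spec_pretty_zpadded; infer_instance

-- ===== CLAIM (what is proved, stated in full; the proofs are below) =====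
def Claim_equal_pretty_zpadded : Prop := ∀ (arr : List Int), Dom_pretty_zpadded arr → Spec_pretty_zpadded arr (pretty_zpadded arr)

-- ===== LEMMAS AND PROOFS =====

-- number of leading zeros
def pvS (l : List Int) : Nat := (l.takeWhile (fun x => x == 0)).length
-- number of trailing zeros
def pvT (l : List Int) : Nat := (l.reverse.takeWhile (fun x => x == 0)).length

theorem pvS_le (l : List Int) : pvS l ≤ l.length :=
  (List.takeWhile_sublist _).length_le

theorem pvT_le (l : List Int) : pvT l ≤ l.length := by
  have h := (List.takeWhile_sublist (fun x : Int => x == 0) (l := l.reverse)).length_le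
  simp only [List.length_reverse] at h
  exact h

theorem pvScanStartA_eq (l : List Int) : ∀ i : Nat, pvScanStartA l i i = i + pvS l := by
  induction l with
  | nil => intro i; simp [pvScanStartA, pvS]
  | cons x xs ih =>
      intro i
      by_cases hx : x = 0
      · simp [pvScanStartA, hx, pvS, ih (i + 1)]; omega
      · simp [pvScanStartA, hx, pvS]

theorem pvT_append_singleton (l : List Int) (a : Int) :
    pvT (l ++ [a]) = if a = 0 then pvT l + 1 else 0 := by
  simp [pvT, List.reverse_append, List.takeWhile_cons]
  by_cases ha : a = 0 <;> simp [ha]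

theorem pvScanEndA_eq (arr : List Int) :
    ∀ i : Nat, i ≤ arr.length → pvScanEndA arr i i = i - pvT (arr.take i) := by
  intro i
  induction i with
  | zero => intro _; simp [pvScanEndA, pvT]
  | succ k ih =>
      intro hk
      have hklt : k < arr.length := by omega
      have htake : arr.take (k + 1) = arr.take k ++ [arr[k]] := by
        simpa using List.take_succ (l := arr) (i := k)
      have hget : arr[k]?.getD 0 = arr[k] := by
        simp [List.getElem?_eq_getElem hklt]
      by_cases hz : arr[k] = 0
      · have hT : pvT (arr.take (k + 1)) = pvT (arr.take k) + 1 := by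
          rw [htake, pvT_append_singleton]; simp [hz]
        have hTk : pvT (arr.take k) ≤ k := by
          have := pvT_le (arr.take k)
          simpa [List.length_take, Nat.min_eq_left (Nat.le_of_lt hklt)] using this
        simp [pvScanEndA, List.getD, hget, hz]
        rw [ih (by omega), hT]; omega
      · have hT : pvT (arr.take (k + 1)) = 0 := by
          rw [htake, pvT_append_singleton]; simp [hz]
        simp [pvScanEndA, List.getD, hget, hz, hT]

-- full characterisation of B's single pass
theorem pvScanB_eq (l : List Int) :
    ∀ (i : Int) (f la : Option Int),
      pvScanB (PySem.List.enumerate l i) f la =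
        ((match f with
          | some j => some j
          | none => if pvS l = l.length then none else some (i + (pvS l : Int))),
         (if pvT l = l.length then la else some (i + (l.length : Int) - 1 - (pvT l : Int)))) := by
  induction l with
  | nil => intro i f la; cases f <;> simp [pvScanB, pvS, pvT, PySem.List.enumerate_nil]
  | cons x xs ih =>
      intro i f la
      rw [PySem.List.enumerate_cons]
      have hSxs := pvS_le xs
      have hTxs := pvT_le xs
      by_cases hx : x = 0
      · subst hx
        have hS : pvS ((0 : Int) :: xs) = pvS xs + 1 := by simp [pvS, List.takeWhile_cons]
        have hT : pvT ((0 : Int) :: xs) = if pvT xs = xs.length then xs.length + 1 else pvT xs := by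
          have hrev : ((0 : Int) :: xs).reverse = xs.reverse ++ [(0 : Int)] := by simp
          simp only [pvT, hrev, List.takeWhile_append]
          by_cases h : (xs.reverse.takeWhile (fun y : Int => y == 0)).length = xs.reverse.length
          · simp only [List.length_reverse] at h
            simp [h]
          · simp only [List.length_reverse] at h
            simp [h]
        simp only [pvScanB, ne_eq, not_true_eq_false, if_false, ih (i + 1) f la, hS, hT,
          List.length_cons, Prod.mk.injEq]
        refine ⟨?_, ?_⟩
        · cases f with
          | some j => simp
          | none =>
              split_ifs <;>
                first
                  | rfl
                  | (exfalso; omega)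
                  | (simp only [Option.some.injEq]; push_cast; ring)
                  | simp
                  | (push_cast; ring)
                  | (exact absurd rfl ‹¬ (none : Option Int) = none›)
        · split_ifs <;>
            first
              | rfl
              | (exfalso; omega)
              | (simp only [Option.some.injEq]; push_cast; ring)
              | simp
              | (push_cast; ring)
              | (exact absurd rfl ‹¬ (none : Option Int) = none›)
      · have hS : pvS (x :: xs) = 0 := by simp [pvS, List.takeWhile_cons, hx]
        have hT : pvT (x :: xs) = if pvT xs = xs.length then xs.length else pvT xs := by
          have hrev : (x :: xs).reverse = xs.reverse ++ [x] := by simp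
          simp only [pvT, hrev, List.takeWhile_append]
          by_cases h : (xs.reverse.takeWhile (fun y : Int => y == 0)).length = xs.reverse.length
          · simp only [List.length_reverse] at h
            simp [h, hx]
          · simp only [List.length_reverse] at h
            simp [h, hx]
        simp only [pvScanB, ne_eq, hx, not_false_eq_true, if_true, ih (i + 1) _ (some i), hS, hT,
          List.length_cons, Prod.mk.injEq]
        refine ⟨?_, ?_⟩
        · cases f with
          | some j => simp
          | none =>
              rw [if_pos rfl]
              split_ifs <;>
                first
                  | rfl
                  | (exfalso; omega)
                  | (simp only [Option.some.injEq]; push_cast; ring)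
                  | simp
                  | (push_cast; ring)
                  | (exact absurd rfl ‹¬ (none : Option Int) = none›)
        · split_ifs <;>
            first
              | rfl
              | (exfalso; omega)
              | (simp only [Option.some.injEq]; push_cast; ring)
              | simp
              | (push_cast; ring)
              | (exact absurd rfl ‹¬ (none : Option Int) = none›)

-- ===== VERDICT (by name: the statement is the Claim_ definition above) =====
theorem pretty_zpadded_spec : Claim_equal_pretty_zpadded := by
  intro arr _
  unfold Spec_pretty_zpadded pretty_zpadded pretty_zpadded_alt
  rw [pvScanStartA_eq arr 0, pvScanEndA_eq arr arr.length (le_refl _), List.take_length,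
      pvScanB_eq arr 0 none none]
  have hS := pvS_le arr
  have hT := pvT_le arr
  have hstart : ((0 + pvS arr : Nat) : Int) =
      (Option.getD (if pvS arr = arr.length then none else some ((0 : Int) + (pvS arr : Int)))
        (arr.length : Int)) := by
    by_cases h : pvS arr = arr.length <;> simp [h]
  have hend : ((arr.length - pvT arr : Nat) : Int) =
      (match (if pvT arr = arr.length then (none : Option Int)
              else some ((0 : Int) + (arr.length : Int) - 1 - (pvT arr : Int))) with
        | some j => j + 1
        | none => 0) := by
    by_cases h : pvT arr = arr.length
    · simp [h]
    · simp only [if_neg h]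
      show ((arr.length - pvT arr : Nat) : Int) = 0 + (arr.length : Int) - 1 - (pvT arr : Int) + 1
      push_cast [Nat.cast_sub hT]
      ring
  rw [← hstart, ← hend]
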